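-- pv_equiv track=rewrite | github.com/haimshalev/NLP-Homeworks | HW4-HMM/hmm.py | BindAllSingleTokens
-- ===== SOURCE A (Python) =====
-- from collections import Counter
--
-- def BindAllSingleTokens(trainData,uniformToken):
--
--     # Count token appearances
--     tokenDic = Counter()
--     for sentence in trainData:
--         for word in sentence:
--             tokenDic.update( [word[0]] )
--
--     # List all the tokens with single appearance
--     appearOnceList = []
--     for token,val in tokenDic.items():
--         if val == 1:
--             appearOnceList.append(token)
--
--     # Replace all the tokens that appear once
--     for i in range( len(trainData) ):
--         for j in range( len(trainData[i]) ):
--             if trainData[i][j][0] in appearOnceList: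
--                 trainData[i][j] = (uniformToken,trainData[i][j][1])
--
--     # Update tokenDic after the replacements
--     tokenDic[uniformToken] = len(appearOnceList)
--     for token in appearOnceList:
--         tokenDic.pop(token)
--
--     return trainData,tokenDic
-- ===== SOURCE B (Python) =====
-- # B: builds an occurrence-position index (token -> list of (i,j)) in one enumerate pass,
-- # then mutates ONLY the singleton positions by direct jump (no rescan of all cells),
-- # and derives the final dict from the group sizes; mutates trainData in place like A.
-- def BindAllSingleTokens(trainData, uniformToken):
--     occ = {}
--     for i, sentence in enumerate(trainData):
--         for j, word in enumerate(sentence):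
--             occ.setdefault(word[0], []).append((i, j))
--
--     singles = [t for t, ps in occ.items() if len(ps) == 1]
--
--     for t in singles:
--         i, j = occ[t][0]
--         trainData[i][j] = (uniformToken, trainData[i][j][1])
--
--     tokenDic = {t: len(ps) for t, ps in occ.items()}
--     tokenDic[uniformToken] = len(singles)
--     for t in singles:
--         del tokenDic[t]
--
--     return trainData, tokenDic
-- ===== Notes on version B (the rewrite author's own statement) =====
-- stated objective: alternative
-- what changed: B indexes each token's occurrence positions in one enumerate pass (token -> list of (i,j)), derives the singleton list from group sizes, and mutates ONLY the singleton cells by jumping directly to their stored positions, instead of A's rescan of every cell with a membership test against the singleton list; the dict is rebuilt from the group sizes and then updated exactly as A does (set uniformToken's count, then pop each singleton).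
import Mathlib
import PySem

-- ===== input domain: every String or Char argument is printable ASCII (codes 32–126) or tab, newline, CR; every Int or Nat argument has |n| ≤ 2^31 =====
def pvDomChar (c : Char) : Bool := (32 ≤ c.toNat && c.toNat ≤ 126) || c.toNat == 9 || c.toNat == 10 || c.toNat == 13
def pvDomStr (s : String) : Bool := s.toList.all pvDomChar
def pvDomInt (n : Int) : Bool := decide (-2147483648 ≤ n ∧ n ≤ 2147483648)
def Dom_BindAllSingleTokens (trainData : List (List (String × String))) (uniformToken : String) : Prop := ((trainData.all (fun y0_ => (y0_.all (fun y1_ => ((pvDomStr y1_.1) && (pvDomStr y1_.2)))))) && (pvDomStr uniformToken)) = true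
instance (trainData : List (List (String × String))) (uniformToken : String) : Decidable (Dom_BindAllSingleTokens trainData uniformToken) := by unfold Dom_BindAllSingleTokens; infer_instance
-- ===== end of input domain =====

-- B builds a token -> occurrence-position index in one enumerate pass, mutates ONLY the
-- singleton positions by direct jump (no rescan of all cells against a singleton list) and
-- derives the final dict from the group sizes (alternative data structure; both Pythons
-- mutate trainData in place, the equivalence proved is about the return value).

-- ===== PORT A =====
def BindAllSingleTokens (trainData : List (List (String × String))) (uniformToken : String) :
    (List (List (String × String))) × (List (String × Int)) :=
  -- tokenDic.update([word[0]]) is d[word[0]] += 1 (default 0) = Dict.modify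
  let tokenDic : PySem.Dict String Int :=
    trainData.foldl (fun d sentence =>
      sentence.foldl (fun d word => d.modify word.1 0 (· + 1)) d) PySem.Dict.empty
  let appearOnceList : List String :=
    tokenDic.items.foldl (fun acc p => if p.2 == 1 then acc ++ [p.1] else acc) []
  let trainData' : List (List (String × String)) :=
    (List.range trainData.length).foldl (fun td i =>
      (List.range ((td.getD i []).length)).foldl (fun td j =>
        if appearOnceList.contains ((td.getD i []).getD j ("", "")).1 then
          td.set i ((td.getD i []).set j (uniformToken, ((td.getD i []).getD j ("", "")).2))
        else td) td) trainData
  -- tokenDic.pop(token): every popped token is a present key, so pop = erase here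
  let tokenDic' : PySem.Dict String Int :=
    appearOnceList.foldl (fun d t => d.erase t)
      (tokenDic.insert uniformToken (appearOnceList.length : Int))
  (trainData', tokenDic'.items)

-- ===== PORT B =====
def BindAllSingleTokens_alt (trainData : List (List (String × String))) (uniformToken : String) :
    (List (List (String × String))) × (List (String × Int)) :=
  -- occ.setdefault(word[0], []).append((i, j)) is d[word[0]] = d.get(word[0], []) + [(i, j)] = Dict.modify
  let occ : PySem.Dict String (List (Int × Int)) :=
    (PySem.List.enumerate trainData 0).foldl (fun d isent =>
      (PySem.List.enumerate isent.2 0).foldl (fun d jword =>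
        d.modify jword.2.1 [] (· ++ [(isent.1, jword.1)])) d) PySem.Dict.empty
  let singles : List String := (occ.items.filter (fun p => p.2.length == 1)).map (·.1)
  let newData : List (List (String × String)) :=
    singles.foldl (fun td t =>
      let ij := PySem.List.pyGetD (occ.getD t []) 0 ((0 : Int), (0 : Int))
      PySem.List.pySetD td ij.1
        (PySem.List.pySetD (PySem.List.pyGetD td ij.1 []) ij.2
          (uniformToken, (PySem.List.pyGetD (PySem.List.pyGetD td ij.1 []) ij.2 ("", "")).2)))
      trainData
  -- {t: len(ps) for t, ps in occ.items()}
  let tokenDic : PySem.Dict String Int :=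
    occ.items.foldl (fun d p => d.insert p.1 (p.2.length : Int)) PySem.Dict.empty
  -- del tokenDic[t]: every deleted token is a present key, so del = erase here
  let tokenDic' : PySem.Dict String Int :=
    singles.foldl (fun d t => d.erase t) (tokenDic.insert uniformToken (singles.length : Int))
  (newData, tokenDic'.items)

-- ===== PRECONDITION & SPEC =====
def Spec_BindAllSingleTokens (trainData : List (List (String × String))) (uniformToken : String) (out : (List (List (String × String))) × (List (String × Int))) : Prop := out = BindAllSingleTokens_alt trainData uniformToken
instance (trainData : List (List (String × String))) (uniformToken : String) (out : (List (List (String × String))) × (List (String × Int))) : Decidable (Spec_BindAllSingleTokens trainData uniformToken out) := by unfold Spec_BindAllSingleTokens; infer_instance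

-- ===== CLAIM (what is proved, stated in full; the proofs are below) =====
def Claim_equal_BindAllSingleTokens : Prop := ∀ (trainData : List (List (String × String))) (uniformToken : String), Dom_BindAllSingleTokens trainData uniformToken → Spec_BindAllSingleTokens trainData uniformToken (BindAllSingleTokens trainData uniformToken)

-- ===== LEMMAS AND PROOFS =====

-- the flattened token list (row-major), the flattened (token, position) list, and B's index
def pvXs (td : List (List (String × String))) : List String :=
  td.flatMap (fun s => s.map (·.1))

def pvP (td : List (List (String × String))) : List (String × (Int × Int)) :=
  (PySem.List.enumerate td 0).flatMap (fun isent =>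
    (PySem.List.enumerate isent.2 0).map (fun jword => (jword.2.1, (isent.1, jword.1))))

def pvOcc (td : List (List (String × String))) : PySem.Dict String (List (Int × Int)) :=
  (pvP td).foldl (fun d p => d.modify p.1 [] (· ++ [p.2])) PySem.Dict.empty

-- A's nested counting loop builds Counter(all tokens flattened).
theorem pv_cnt_eq (trainData : List (List (String × String))) :
    trainData.foldl (fun d sentence =>
        sentence.foldl (fun d word => d.modify word.1 0 (· + 1)) d) PySem.Dict.empty
      = PySem.Dict.counter (pvXs trainData) := by
  rw [pvXs, PySem.Dict.counter, List.foldl_flatMap]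
  simp [List.foldl_map]

-- B's nested enumerate loop is the flat fold over pvP.
theorem pv_occ_eq (trainData : List (List (String × String))) :
    (PySem.List.enumerate trainData 0).foldl (fun d isent =>
      (PySem.List.enumerate isent.2 0).foldl (fun d jword =>
        d.modify jword.2.1 [] (· ++ [(isent.1, jword.1)])) d) PySem.Dict.empty
      = pvOcc trainData := by
  rw [pvOcc, pvP, List.foldl_flatMap]
  simp [List.foldl_map]

-- enumerate membership
theorem pv_mem_enumerate {α : Type} (l : List α) :
    ∀ (s : Int) (p : Int × α), p ∈ PySem.List.enumerate l s ↔
      ∃ n : Nat, ∃ h : n < l.length, p = (s + n, l[n]) := by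
  induction l with
  | nil => intro s p; simp [PySem.List.enumerate_nil]
  | cons x xs ih =>
    intro s p
    rw [PySem.List.enumerate_cons, List.mem_cons, ih]
    constructor
    · rintro (rfl | ⟨n, h, rfl⟩)
      · exact ⟨0, by simp, by simp⟩
      · exact ⟨n + 1, by simpa using h, by simp [Prod.ext_iff]; ring⟩
    · rintro ⟨n, h, rfl⟩
      cases n with
      | zero => left; simp
      | succ n => right; exact ⟨n, by simpa using h, by simp [Prod.ext_iff]; ring⟩

-- flatMap over an enumeration that only uses the element is a plain flatMap
theorem pv_flatMap_enumerate {α β : Type} (g : α → List β) (l : List α) :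
    ∀ s : Int, (PySem.List.enumerate l s).flatMap (fun p => g p.2) = l.flatMap g := by
  induction l with
  | nil => intro s; simp [PySem.List.enumerate_nil]
  | cons x xs ih => intro s; simp [PySem.List.enumerate_cons, ih]

-- pvP lists exactly the cells, with their row-major positions
theorem pv_mem_pvP (td : List (List (String × String))) (t : String) (ij : Int × Int) :
    (t, ij) ∈ pvP td ↔
      ∃ a b : Nat, a < td.length ∧ b < (td.getD a []).length ∧
        ((td.getD a []).getD b ("", "")).1 = t ∧ ij = ((a : Int), (b : Int)) := by
  rw [pvP, List.mem_flatMap]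
  constructor
  · rintro ⟨isent, hsent, hmem⟩
    rw [List.mem_map] at hmem
    obtain ⟨jword, hj, hpair⟩ := hmem
    rw [pv_mem_enumerate] at hsent
    obtain ⟨a, ha, rfl⟩ := hsent
    rw [pv_mem_enumerate] at hj
    obtain ⟨b, hb, rfl⟩ := hj
    simp only [Prod.mk.injEq] at hpair
    refine ⟨a, b, ha, ?_, ?_, ?_⟩
    · rwa [List.getD_eq_getElem _ _ ha]
    · rw [List.getD_eq_getElem _ _ ha, List.getD_eq_getElem _ _ (by simpa [List.getD_eq_getElem _ _ ha] using hb)]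
      simpa using hpair.1
    · simpa using hpair.2.symm
  · rintro ⟨a, b, ha, hb, ht, rfl⟩
    rw [List.getD_eq_getElem _ _ ha] at hb ht
    refine ⟨((a : Int), td[a]), ?_, ?_⟩
    · rw [pv_mem_enumerate]; exact ⟨a, ha, by simp⟩
    · rw [List.mem_map]
      refine ⟨((b : Int), td[a][b]), ?_, ?_⟩
      · rw [pv_mem_enumerate]; exact ⟨b, hb, by simp⟩
      · rw [List.getD_eq_getElem _ _ hb] at ht
        simp [ht]

-- fst of pvP is the flattened token list
theorem pv_pvP_map_fst (td : List (List (String × String))) :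
    (pvP td).map (·.1) = pvXs td := by
  rw [pvP, pvXs, List.map_flatMap]
  rw [← pv_flatMap_enumerate (fun sentence => sentence.map (·.1)) td 0]
  congr 1
  funext isent
  rw [List.map_map]
  have := PySem.List.map_snd_enumerate isent.2 0
  calc (PySem.List.enumerate isent.2 0).map ((·.1) ∘ (fun jword => (jword.2.1, (isent.1, jword.1))))
      = ((PySem.List.enumerate isent.2 0).map (·.2)).map (·.1) := by rw [List.map_map]; rfl
    _ = isent.2.map (·.1) := by rw [this]

theorem pv_occ_getD (td : List (List (String × String))) (t : String) :
    (pvOcc td).getD t [] = ((pvP td).filter (fun p => p.1 == t)).map (·.2) := by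
  rw [pvOcc, PySem.Dict.getD_foldl_modify_append, PySem.Dict.getD_empty, List.nil_append]

theorem pv_occ_keys (td : List (List (String × String))) :
    (pvOcc td).keys = PySem.Set.ofList (pvXs td) := by
  rw [pvOcc, PySem.Dict.keys_foldl_modify_key, PySem.Dict.keys_empty,
    PySem.Set.update_nil_left, pv_pvP_map_fst]

theorem pv_occ_nodup (td : List (List (String × String))) : (pvOcc td).keys.Nodup := by
  rw [pvOcc]
  exact PySem.Dict.nodup_keys_foldl_modify_key _ _ _ _ _ PySem.Dict.nodup_keys_empty

theorem pv_occ_items (td : List (List (String × String))) :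
    (pvOcc td).items = (PySem.Set.ofList (pvXs td)).map (fun k => (k, (pvOcc td).getD k [])) := by
  rw [← pv_occ_keys]
  exact PySem.Dict.items_eq_map_keys _ (pv_occ_nodup td) []

-- the length of a token's position group is its count in the flattened token list
theorem pv_group_len (td : List (List (String × String))) (t : String) :
    ((pvOcc td).getD t []).length = (pvXs td).count t := by
  rw [pv_occ_getD, List.length_map, ← List.countP_eq_length_filter, ← pv_pvP_map_fst,
    List.count_eq_countP, List.countP_map]
  rfl

-- canonical singleton list
def pvSingles (td : List (List (String × String))) : List String :=
  (PySem.Set.ofList (pvXs td)).filter (fun k => (pvXs td).count k == 1)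

theorem pv_int_one (n : Nat) : (((n : Int)) == (1 : Int)) = (n == 1) := by
  rw [Bool.eq_iff_iff]; simp

-- A's appearOnceList is pvSingles
theorem pv_singles_A (td : List (List (String × String))) :
    (PySem.Dict.counter (pvXs td)).items.foldl
      (fun acc p => if p.2 == 1 then acc ++ [p.1] else acc) [] = pvSingles td := by
  rw [PySem.List.foldl_append_if (fun p => p.2 == 1) (·.1) (PySem.Dict.counter (pvXs td)).items [],
    List.nil_append, PySem.Dict.items_counter, List.filter_map, List.map_map, pvSingles]
  have : ((·.1) ∘ fun k => (k, ((pvXs td).count k : Int))) = (id : String → String) := rfl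
  rw [this, List.map_id]
  congr 1
  funext k
  exact pv_int_one _

-- B's singles list is pvSingles
theorem pv_singles_B (td : List (List (String × String))) :
    ((pvOcc td).items.filter (fun p => p.2.length == 1)).map (·.1) = pvSingles td := by
  rw [pv_occ_items, List.filter_map, List.map_map, pvSingles]
  have : ((·.1) ∘ fun k => (k, (pvOcc td).getD k [])) = (id : String → String) := rfl
  rw [this, List.map_id]
  congr 1
  funext k
  simp only [Function.comp, pv_group_len]

-- B's dict comprehension rebuilds the counter
theorem pv_dict_B (td : List (List (String × String))) :
    (pvOcc td).items.foldl (fun d p => d.insert p.1 (p.2.length : Int)) PySem.Dict.empty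
      = PySem.Dict.counter (pvXs td) := by
  apply PySem.Dict.ext
  rw [PySem.Dict.items_foldl_insert_fresh (pvOcc td).items (·.1) (fun p => (p.2.length : Int))
      PySem.Dict.empty (fun p _ => PySem.Dict.contains_empty _)
      (by have := pv_occ_nodup td; simpa [PySem.Dict.keys] using this),
    show PySem.Dict.empty.items = ([] : List (String × Int)) from rfl,
    List.nil_append, PySem.Dict.items_counter, pv_occ_items, List.map_map]
  apply List.map_congr_left
  intro k _
  simp only [Function.comp, pv_group_len]

-- ==== A's replacement nest is map (map f)  (same lemmas as before) ====
theorem pv_row_aux {α : Type} (c : α → Bool) (h : α → α) (d : α) :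
    ∀ (suf pre : List α),
      (List.range' pre.length suf.length).foldl
        (fun s j => if c (s.getD j d) then s.set j (h (s.getD j d)) else s) (pre ++ suf)
      = pre ++ suf.map (fun x => if c x then h x else x) := by
  intro suf
  induction suf with
  | nil => intro pre; simp
  | cons a suf ih =>
    intro pre
    rw [List.length_cons, List.range'_succ, List.foldl_cons]
    have hget : (pre ++ a :: suf).getD pre.length d = a := by
      rw [List.getD_eq_getElem _ _ (by simp)]; simp
    have hset : ∀ x, (pre ++ a :: suf).set pre.length x = pre ++ x :: suf := by
      intro x
      rw [List.set_append_right _ _ (Nat.le_refl _)]; simp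
    rw [hget]
    by_cases hc : c a = true
    · rw [if_pos hc, hset]
      have := ih (pre ++ [h a])
      simpa [hc] using this
    · rw [if_neg hc]
      have := ih (pre ++ [a])
      simpa [hc] using this

theorem pv_row {α : Type} (c : α → Bool) (h : α → α) (d : α) (s : List α) :
    (List.range s.length).foldl
      (fun s j => if c (s.getD j d) then s.set j (h (s.getD j d)) else s) s
    = s.map (fun x => if c x then h x else x) := by
  have := pv_row_aux c h d s []
  simpa [List.range_eq_range'] using this

theorem pv_inner_commute {β : Type} (c : β → Bool) (h : β → β) (d : β) (i : Nat) :
    ∀ (js : List Nat) (td : List (List β)), i < td.length →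
      js.foldl (fun td j =>
          if c ((td.getD i []).getD j d) then
            td.set i ((td.getD i []).set j (h ((td.getD i []).getD j d)))
          else td) td
      = td.set i (js.foldl
          (fun s j => if c (s.getD j d) then s.set j (h (s.getD j d)) else s) (td.getD i [])) := by
  intro js
  induction js with
  | nil =>
    intro td hi
    rw [List.foldl_nil, List.foldl_nil, List.getD_eq_getElem _ _ hi, List.set_getElem_self]
  | cons j js ih =>
    intro td hi
    rw [List.foldl_cons, List.foldl_cons]
    by_cases hc : c ((td.getD i []).getD j d) = true
    · rw [if_pos hc, if_pos hc, ih _ (by simpa using hi)]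
      have hr : ((td.set i ((td.getD i []).set j (h ((td.getD i []).getD j d)))).getD i [])
          = (td.getD i []).set j (h ((td.getD i []).getD j d)) := by
        rw [List.getD_eq_getElem _ _ (by simpa using hi), List.getElem_set_self]
      rw [hr, List.set_set]
    · rw [if_neg hc, if_neg hc, ih _ hi]

theorem pv_outer_aux {β : Type} (c : β → Bool) (h : β → β) (d : β) :
    ∀ (suf pre : List (List β)),
      (List.range' pre.length suf.length).foldl (fun td i =>
        (List.range ((td.getD i []).length)).foldl (fun td j =>
          if c ((td.getD i []).getD j d) then
            td.set i ((td.getD i []).set j (h ((td.getD i []).getD j d)))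
          else td) td) (pre ++ suf)
      = pre ++ suf.map (fun row => row.map (fun x => if c x then h x else x)) := by
  intro suf
  induction suf with
  | nil => intro pre; simp
  | cons r suf ih =>
    intro pre
    rw [List.length_cons, List.range'_succ, List.foldl_cons]
    have hget : (pre ++ r :: suf).getD pre.length [] = r := by
      rw [List.getD_eq_getElem _ _ (by simp)]; simp
    have hset : ∀ x, (pre ++ r :: suf).set pre.length x = pre ++ x :: suf := by
      intro x
      rw [List.set_append_right _ _ (Nat.le_refl _)]; simp
    rw [pv_inner_commute c h d _ _ _ (by simp), hget, pv_row, hset]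
    have := ih (pre ++ [r.map (fun x => if c x then h x else x)])
    simpa using this

theorem pv_outer {β : Type} (c : β → Bool) (h : β → β) (d : β) (td : List (List β)) :
    (List.range td.length).foldl (fun td i =>
      (List.range ((td.getD i []).length)).foldl (fun td j =>
        if c ((td.getD i []).getD j d) then
          td.set i ((td.getD i []).set j (h ((td.getD i []).getD j d)))
        else td) td) td
    = td.map (fun row => row.map (fun x => if c x then h x else x)) := by
  have := pv_outer_aux c h d td []
  simpa [List.range_eq_range'] using this

-- ==== B's replacement fold is map (map f) ====
theorem pv_rep_fold (td0 : List (List (String × String))) (u : String) :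
    ∀ (s : List String), s.Nodup →
      (∀ t ∈ s, ∃ a b : Nat, a < td0.length ∧ b < (td0.getD a []).length ∧
          ((td0.getD a []).getD b ("", "")).1 = t ∧
          PySem.List.pyGetD ((pvOcc td0).getD t []) 0 ((0 : Int), (0 : Int)) = ((a : Int), (b : Int)) ∧
          (∀ a' b' : Nat, a' < td0.length → b' < (td0.getD a' []).length →
            ((td0.getD a' []).getD b' ("", "")).1 = t → a' = a ∧ b' = b)) →
      s.foldl (fun td t =>
          let ij := PySem.List.pyGetD ((pvOcc td0).getD t []) 0 ((0 : Int), (0 : Int))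
          PySem.List.pySetD td ij.1
            (PySem.List.pySetD (PySem.List.pyGetD td ij.1 []) ij.2
              (u, (PySem.List.pyGetD (PySem.List.pyGetD td ij.1 []) ij.2 ("", "")).2))) td0
      = td0.map (fun row => row.map (fun p => if s.contains p.1 then (u, p.2) else p)) := by
  intro s
  induction s using List.reverseRecOn with
  | nil => intro _ _; simp
  | append_singleton s t ih =>
    intro hnd hprops
    have hnds : s.Nodup := hnd.sublist (List.sublist_append_left _ _)
    have htns : t ∉ s := fun hmem =>
      (List.disjoint_of_nodup_append hnd) hmem (List.mem_singleton_self t)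
    rw [List.foldl_append, List.foldl_cons, List.foldl_nil,
      ih hnds (fun x hx => hprops x (List.mem_append_left _ hx))]
    obtain ⟨a, b, ha, hb, htok, hpos, huniq⟩ :=
      hprops t (List.mem_append_right _ (List.mem_singleton_self t))
    simp only [hpos]
    set row : List (String × String) := td0.getD a [] with hrowdef
    set fS : (String × String) → (String × String) :=
      (fun p => if s.contains p.1 then (u, p.2) else p) with hfS
    set fT : (String × String) → (String × String) :=
      (fun p => if (s ++ [t]).contains p.1 then (u, p.2) else p) with hfT
    have hfS_ne : ∀ p : String × String, p.1 ≠ t → fS p = fT p := by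
      intro p hp
      simp only [hfS, hfT, List.contains_append]
      have : [t].contains p.1 = false := by simpa using hp
      rw [this, Bool.or_false]
    have hrowlen : b < (row.map fS).length := by simpa using hb
    have hMget : PySem.List.pyGetD (td0.map (fun r => r.map fS)) ((a : Nat) : Int) []
        = row.map fS := by
      rw [PySem.List.pyGetD_natCast, List.getD_eq_getElem _ _ (by simpa using ha),
        List.getElem_map, hrowdef, List.getD_eq_getElem _ _ ha]
    have hcellget : PySem.List.pyGetD (row.map fS) ((b : Nat) : Int) ("", "")
        = fS (row.getD b ("", "")) := by
      rw [PySem.List.pyGetD_natCast, List.getD_eq_getElem _ _ hrowlen, List.getElem_map,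
        List.getD_eq_getElem _ _ hb]
    have hcellS : fS (row.getD b ("", "")) = row.getD b ("", "") := by
      rw [hfS]
      have : s.contains (row.getD b ("", "")).1 = false := by
        rw [htok]; simpa using htns
      simp only [this, Bool.false_eq_true, ite_false]
    rw [hMget, hcellget, hcellS, PySem.List.pySetD_natCast, PySem.List.pySetD_natCast]
    apply List.ext_getElem (by simp)
    intro r hr hr'
    rw [List.getElem_map (h := by simpa using hr')]
    by_cases hra : r = a
    · subst hra
      rw [List.getElem_set_self (by simpa using hr'), ← List.getD_eq_getElem td0 [] ha, ← hrowdef]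
      apply List.ext_getElem (by simp)
      intro c hc hc'
      have hcb : c < row.length := by simpa using hc'
      rw [List.getElem_map (h := by simpa using hcb)]
      by_cases hcbeq : c = b
      · subst hcbeq
        rw [List.getElem_set_self (by simpa using hcb)]
        have hcell : row[c] = row.getD c ("", "") := (List.getD_eq_getElem _ _ hcb).symm
        rw [hcell, hfT]
        have ht' : (s ++ [t]).contains (row.getD c ("", "")).1 = true := by
          rw [htok]; simp
        simp only [ht', if_pos]
      · rw [List.getElem_set_ne (by omega), List.getElem_map (h := by simpa using hcb)]
        apply hfS_ne
        intro hteq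
        have htokc : ((td0.getD r []).getD c ("", "")).1 = t := by
          rw [← hrowdef, List.getD_eq_getElem _ _ hcb]; exact hteq
        exact hcbeq (huniq r c ha (by rw [hrowdef] at hcb; exact hcb) htokc).2
    · have hrlen : r < td0.length := by simpa using hr
      rw [List.getElem_set_ne (by omega), List.getElem_map (h := by simpa using hrlen),
        ← List.getD_eq_getElem td0 [] hrlen]
      apply List.map_congr_left
      intro p hp
      apply hfS_ne
      intro hteq
      obtain ⟨c, hc, hpc⟩ := List.mem_iff_getElem.mp hp
      have hcd : (td0.getD r []).getD c ("", "") = p := by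
        rw [List.getD_eq_getElem _ _ hc, hpc]
      exact hra (huniq r c hrlen hc (by rw [hcd]; exact hteq)).1

-- every member of pvSingles satisfies the unique-cell property used by pv_rep_fold
theorem pv_singles_cells (td : List (List (String × String))) :
    ∀ t ∈ pvSingles td, ∃ a b : Nat, a < td.length ∧ b < (td.getD a []).length ∧
      ((td.getD a []).getD b ("", "")).1 = t ∧
      PySem.List.pyGetD ((pvOcc td).getD t []) 0 ((0 : Int), (0 : Int)) = ((a : Int), (b : Int)) ∧
      (∀ a' b' : Nat, a' < td.length → b' < (td.getD a' []).length →
        ((td.getD a' []).getD b' ("", "")).1 = t → a' = a ∧ b' = b) := by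
  intro t ht
  rw [pvSingles, List.mem_filter] at ht
  obtain ⟨_, hcnt⟩ := ht
  have hcnt' : (pvXs td).count t = 1 := by simpa using hcnt
  have hlen : ((pvOcc td).getD t []).length = 1 := by rw [pv_group_len, hcnt']
  have hflen : ((pvP td).filter (fun p => p.1 == t)).length = 1 := by
    rw [pv_occ_getD, List.length_map] at hlen; exact hlen
  obtain ⟨q, hq⟩ := List.length_eq_one_iff.mp hflen
  have hqmem : q ∈ (pvP td).filter (fun p => p.1 == t) := by rw [hq]; simp
  have hq1 : q.1 = t := by simpa using (List.mem_filter.mp hqmem).2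
  have hqP : (t, q.2) ∈ pvP td := by
    have h1 : q ∈ pvP td := (List.mem_filter.mp hqmem).1
    rw [← hq1]
    exact h1
  obtain ⟨a, b, ha, hb, htok, hab⟩ := (pv_mem_pvP td t q.2).mp hqP
  have hpos : PySem.List.pyGetD ((pvOcc td).getD t []) 0 ((0 : Int), (0 : Int)) = ((a : Int), (b : Int)) := by
    rw [pv_occ_getD, hq, List.map_cons, List.map_nil, PySem.List.pyGetD_zero_cons, ← hab]
  refine ⟨a, b, ha, hb, htok, hpos, ?_⟩
  intro a' b' ha' hb' htok'
  have hmem' : (t, ((a' : Int), (b' : Int))) ∈ pvP td :=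
    (pv_mem_pvP td t _).mpr ⟨a', b', ha', hb', htok', rfl⟩
  have : (t, ((a' : Int), (b' : Int))) ∈ (pvP td).filter (fun p => p.1 == t) :=
    List.mem_filter.mpr ⟨hmem', by simp⟩
  rw [hq, List.mem_singleton] at this
  have h2 : ((a' : Int), (b' : Int)) = q.2 := congrArg Prod.snd this
  rw [hab] at h2
  simp only [Prod.mk.injEq, Nat.cast_inj] at h2
  exact h2

theorem pv_singles_nodup (td : List (List (String × String))) : (pvSingles td).Nodup := by
  exact (PySem.Set.nodup_ofList _).filter _

-- ===== VERDICT (by name: the statement is the Claim_ definition above) =====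
theorem BindAllSingleTokens_spec : Claim_equal_BindAllSingleTokens := by
  intro trainData uniformToken _
  unfold Spec_BindAllSingleTokens BindAllSingleTokens BindAllSingleTokens_alt
  simp only []
  rw [pv_cnt_eq, pv_occ_eq, pv_singles_A, pv_singles_B, pv_dict_B]
  rw [pv_outer (fun p => (pvSingles trainData).contains p.1) (fun p => (uniformToken, p.2)) ("", "")]
  rw [pv_rep_fold trainData uniformToken (pvSingles trainData) (pv_singles_nodup trainData)
      (pv_singles_cells trainData)]
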